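-- pv_equiv track=rewrite | github.com/Midast0uch/IRISVOICE | IRISVOICE/backend/iris_gateway.py | _extract_skill_description
-- ===== SOURCE A (Python) =====
-- def _extract_skill_description(skill_md_text: str) -> str:
--     """Pull the description from YAML frontmatter, or return first content line."""
--     in_fm = False
--     seen_fm = False
--     fm_closed = False
--     for line in skill_md_text.splitlines():
--         stripped = line.strip()
--         if stripped == "---":
--             if not seen_fm:
--                 in_fm = True
--                 seen_fm = True
--             elif in_fm:
--                 in_fm = False
--                 fm_closed = True
--             continue
--         if in_fm and stripped.lower().startswith("description:"):
--             return stripped.split(":", 1)[1].strip().strip('"').strip("'")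
--     # Fallback: first non-empty, non-header content line
--     in_fm = False
--     seen_fm = False
--     for line in skill_md_text.splitlines():
--         stripped = line.strip()
--         if stripped == "---":
--             if not seen_fm:
--                 in_fm = True
--                 seen_fm = True
--             elif in_fm:
--                 in_fm = False
--             continue
--         if in_fm:
--             continue
--         if stripped and not stripped.startswith("#"):
--             return stripped[:120]
--     return ""
-- ===== SOURCE B (Python) =====
-- def _extract_skill_description(skill_md_text: str) -> str:
--     """Single pass: return a frontmatter description immediately; remember the
--     first non-frontmatter content line as the fallback candidate."""
--     in_fm = False
--     seen_fm = False
--     candidate = None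
--     for line in skill_md_text.splitlines():
--         stripped = line.strip()
--         if stripped == "---":
--             if not seen_fm:
--                 in_fm = True
--                 seen_fm = True
--             elif in_fm:
--                 in_fm = False
--             continue
--         if in_fm:
--             if stripped.lower().startswith("description:"):
--                 return stripped.split(":", 1)[1].strip().strip('"').strip("'")
--             continue
--         if candidate is None and stripped and not stripped.startswith("#"):
--             candidate = stripped[:120]
--     return candidate if candidate is not None else ""
-- ===== Notes on version B (the rewrite author's own statement) =====
-- stated objective: simpler
-- what changed: Replaces A's two full scans of the lines (one for the frontmatter description, a second re-running the same '---' state machine for the fallback line) with a single pass that returns a description immediately and records the first content line as a fallback candidate.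
import Mathlib
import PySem

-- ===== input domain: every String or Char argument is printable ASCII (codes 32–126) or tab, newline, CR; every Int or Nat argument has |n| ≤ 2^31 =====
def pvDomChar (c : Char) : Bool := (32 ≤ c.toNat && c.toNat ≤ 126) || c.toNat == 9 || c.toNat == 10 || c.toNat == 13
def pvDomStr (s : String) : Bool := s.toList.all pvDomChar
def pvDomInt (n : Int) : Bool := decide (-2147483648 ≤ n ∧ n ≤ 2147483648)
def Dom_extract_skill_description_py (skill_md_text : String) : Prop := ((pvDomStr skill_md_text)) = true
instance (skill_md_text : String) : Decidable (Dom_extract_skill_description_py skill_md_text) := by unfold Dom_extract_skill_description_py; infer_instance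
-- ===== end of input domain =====

-- B replaces A's two scans of the lines with one pass that returns a frontmatter
-- description immediately and keeps the first content line as a fallback candidate.

-- ===== PORT A =====
-- shared parse of "description: <value>": stripped.split(":", 1)[1].strip().strip('"').strip("'")
-- (parts[1] via pyGet?/getD ""; the default is unreachable, the guard guarantees a ":")
def pvParseDesc (stripped : String) : String :=
  PySem.Str.stripChars
    (PySem.Str.stripChars
      (PySem.Str.strip (((PySem.Str.splitMax? stripped ":" 1).getD []).getD 1 ""))
      "\"")
    "'"

-- first pass of A: find a frontmatter description (fm_closed carried though never read, as in A)
def pvDescLoop : List String → Bool → Bool → Bool → Option String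
  | [], _, _, _ => none
  | line :: rest, in_fm, seen_fm, fm_closed =>
    let stripped := PySem.Str.strip line
    if stripped == "---" then
      if !seen_fm then pvDescLoop rest true true fm_closed
      else if in_fm then pvDescLoop rest false seen_fm true
      else pvDescLoop rest in_fm seen_fm fm_closed
    else if in_fm && PySem.Str.startswith (PySem.Str.lower stripped) "description:" then
      some (pvParseDesc stripped)
    else pvDescLoop rest in_fm seen_fm fm_closed

-- second pass of A: first non-empty, non-header content line outside frontmatter
def pvFallbackLoop : List String → Bool → Bool → String
  | [], _, _ => ""
  | line :: rest, in_fm, seen_fm =>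
    let stripped := PySem.Str.strip line
    if stripped == "---" then
      if !seen_fm then pvFallbackLoop rest true true
      else if in_fm then pvFallbackLoop rest false seen_fm
      else pvFallbackLoop rest in_fm seen_fm
    else if in_fm then pvFallbackLoop rest in_fm seen_fm
    else if !(stripped == "") && !PySem.Str.startswith stripped "#" then
      PySem.Str.slice stripped none (some 120)
    else pvFallbackLoop rest in_fm seen_fm

def extract_skill_description_py (skill_md_text : String) : String :=
  match pvDescLoop (PySem.Str.splitlines skill_md_text) false false false with
  | some d => d
  | none => pvFallbackLoop (PySem.Str.splitlines skill_md_text) false false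

-- ===== PORT B =====
-- single pass; `cand` is the fallback candidate (None until the first content line)
def pvAltLoop : List String → Bool → Bool → Option String → String
  | [], _, _, cand => cand.getD ""
  | line :: rest, in_fm, seen_fm, cand =>
    let stripped := PySem.Str.strip line
    if stripped == "---" then
      if !seen_fm then pvAltLoop rest true true cand
      else if in_fm then pvAltLoop rest false seen_fm cand
      else pvAltLoop rest in_fm seen_fm cand
    else if in_fm then
      if PySem.Str.startswith (PySem.Str.lower stripped) "description:" then pvParseDesc stripped
      else pvAltLoop rest in_fm seen_fm cand
    else if cand.isNone && (!(stripped == "") && !PySem.Str.startswith stripped "#") then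
      pvAltLoop rest in_fm seen_fm (some (PySem.Str.slice stripped none (some 120)))
    else pvAltLoop rest in_fm seen_fm cand

def extract_skill_description_py_alt (skill_md_text : String) : String :=
  pvAltLoop (PySem.Str.splitlines skill_md_text) false false none

-- ===== PRECONDITION & SPEC =====
def Spec_extract_skill_description_py (skill_md_text : String) (out : String) : Prop := out = extract_skill_description_py_alt skill_md_text
instance (skill_md_text : String) (out : String) : Decidable (Spec_extract_skill_description_py skill_md_text out) := by unfold Spec_extract_skill_description_py; infer_instance

-- ===== CLAIM (what is proved, stated in full; the proofs are below) =====
def Claim_equal_extract_skill_description_py : Prop := ∀ (skill_md_text : String), Dom_extract_skill_description_py skill_md_text → Spec_extract_skill_description_py skill_md_text (extract_skill_description_py skill_md_text)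

-- ===== LEMMAS AND PROOFS =====

-- ===== VERDICT (by name: the statement is the Claim_ definition above) =====
-- the one-pass loop equals "description result, else candidate, else fallback scan"
lemma pvAltLoop_eq (ls : List String) : ∀ (in_fm seen_fm fm_closed : Bool) (cand : Option String),
    pvAltLoop ls in_fm seen_fm cand =
      match pvDescLoop ls in_fm seen_fm fm_closed with
      | some d => d
      | none =>
        match cand with
        | some c => c
        | none => pvFallbackLoop ls in_fm seen_fm := by
  induction ls with
  | nil =>
    intro in_fm seen_fm fm_closed cand
    cases cand <;> simp [pvAltLoop, pvDescLoop, pvFallbackLoop]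
  | cons line rest ih =>
    intro in_fm seen_fm fm_closed cand
    simp only [pvAltLoop, pvDescLoop, pvFallbackLoop]
    cases hFm : (PySem.Str.strip line == "---") with
    | true =>
      simp only [if_true]
      cases seen_fm <;> cases in_fm <;> simp only [Bool.not_true, Bool.not_false, if_true] <;> exact ih _ _ _ _
    | false =>
      simp only [Bool.false_eq_true, if_false]
      cases in_fm with
      | true =>
        cases hDesc : PySem.Str.startswith (PySem.Str.lower (PySem.Str.strip line)) "description:" with
        | true => simp
        | false => simp only [Bool.true_and, Bool.false_eq_true, if_false]
                   exact ih _ _ _ _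
      | false =>
        simp only [Bool.false_and, Bool.false_eq_true, if_false]
        cases hC : (!(PySem.Str.strip line == "") && !PySem.Str.startswith (PySem.Str.strip line) "#") with
        | true =>
          cases cand with
          | none => simp only [Option.isNone_none, Bool.true_and, if_true,
                      ih _ _ fm_closed]
          | some c => simp only [Option.isNone_some, Bool.false_and,
                        Bool.false_eq_true, if_false, ih _ _ fm_closed]
        | false =>
          cases cand <;>
            simp only [Option.isNone_none, Option.isNone_some,
              Bool.and_false, Bool.false_eq_true, if_false,
              ih _ _ fm_closed]

theorem extract_skill_description_py_spec : Claim_equal_extract_skill_description_py := by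
  intro s _
  show extract_skill_description_py s = extract_skill_description_py_alt s
  rw [extract_skill_description_py, extract_skill_description_py_alt,
      pvAltLoop_eq _ _ _ false none]
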